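-- pv_equiv track=rewrite | github.com/DragonKyro/python-arcade | ai/yahtzee_ai.py | _pick_least_damaging
-- ===== SOURCE A (Python) =====
-- def _pick_least_damaging(dice, available):
--     """
--     When all available scores are 0, pick the category where we lose
--     the least expected future value. Prefer to waste yahtzee (if unlikely)
--     or the upper category with the lowest face value.
--     """
--     # Priority: waste the category with the lowest maximum possible score
--     waste_priority = [
--         "yahtzee", "large_straight", "full_house", "small_straight",
--         "four_of_kind", "three_of_kind",
--         "ones", "twos", "threes", "fours", "fives", "sixes", "chance",
--     ]
--     for cat in waste_priority:
--         if cat in available: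
--             return cat
--     return available[0]
-- ===== SOURCE B (Python) =====
-- def _pick_least_damaging(dice, available):
--     """
--     When all available scores are 0, pick the category where we lose
--     the least expected future value. Prefer to waste yahtzee (if unlikely)
--     or the upper category with the lowest face value.
--     """
--     waste_priority = [
--         "yahtzee", "large_straight", "full_house", "small_straight",
--         "four_of_kind", "three_of_kind",
--         "ones", "twos", "threes", "fours", "fives", "sixes", "chance",
--     ]
--     rank = {cat: i for i, cat in enumerate(waste_priority)}
--     # Pick the available category with the best (lowest) priority rank;
--     # unranked categories sort last, ties keep the first occurrence.
--     return min(available, key=lambda c: rank.get(c, len(waste_priority)))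
-- ===== Notes on version B (the rewrite author's own statement) =====
-- stated objective: idiomatic
-- what changed: Instead of scanning the fixed priority list and testing membership in 'available' for each category, B precomputes a rank dict from the priority list and takes min(available, key=rank), scanning 'available' once.
-- outside the precondition, e.g. on _pick_least_damaging([1, 2, 3, 4, 5], []): A raises IndexError, B raises ValueError
import Mathlib
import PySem

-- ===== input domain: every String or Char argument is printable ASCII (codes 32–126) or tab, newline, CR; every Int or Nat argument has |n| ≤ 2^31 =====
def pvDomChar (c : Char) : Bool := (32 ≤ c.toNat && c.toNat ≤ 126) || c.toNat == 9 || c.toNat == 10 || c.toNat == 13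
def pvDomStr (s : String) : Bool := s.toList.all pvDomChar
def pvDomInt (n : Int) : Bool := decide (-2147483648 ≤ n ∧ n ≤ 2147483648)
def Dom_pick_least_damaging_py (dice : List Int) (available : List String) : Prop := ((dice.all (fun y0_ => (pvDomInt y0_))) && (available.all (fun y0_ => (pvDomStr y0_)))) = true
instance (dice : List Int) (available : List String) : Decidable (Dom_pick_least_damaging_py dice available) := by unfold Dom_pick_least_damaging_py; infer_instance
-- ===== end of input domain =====

-- B replaces A's scan of the fixed priority list (membership test per category) by a
-- precomputed rank dict and a single min-by-rank pass over 'available' (idiomatic).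


-- the module constant 'waste_priority' (shared verbatim by both Pythons)
def pvWastePriority : List String :=
  ["yahtzee", "large_straight", "full_house", "small_straight",
   "four_of_kind", "three_of_kind",
   "ones", "twos", "threes", "fours", "fives", "sixes", "chance"]

-- ===== PORT A =====
-- the 'for cat in waste_priority: if cat in available: return cat' loop
def pickLeastGo (available : List String) : List String → Option String
  | [] => none
  | cat :: rest => if available.contains cat then some cat else pickLeastGo available rest

def pick_least_damaging_py (dice : List Int) (available : List String) : String :=
  match pickLeastGo available pvWastePriority with
  | some cat => cat
  | none => (PySem.List.pyGet? available 0).getD ""  -- available[0]; none (IndexError) excluded by Pre_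

-- ===== PORT B =====
-- rank = {cat: i for i, cat in enumerate(waste_priority)}
def pvRank : PySem.Dict String Int :=
  (PySem.List.enumerate pvWastePriority 0).foldl (fun d p => d.insert p.2 p.1) PySem.Dict.empty

def pick_least_damaging_py_alt (dice : List Int) (available : List String) : String :=
  -- min(available, key=lambda c: rank.get(c, len(waste_priority))); none (ValueError) excluded by Pre_
  (PySem.List.min? available
    (fun c => pvRank.getD c ((pvWastePriority.length : Int)))).getD ""

-- ===== PRECONDITION & SPEC =====
-- A raises IndexError on empty 'available' (and B's min raises ValueError there): excluded.
def Pre_pick_least_damaging_py (dice : List Int) (available : List String) : Prop :=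
  available ≠ []
instance (dice : List Int) (available : List String) : Decidable (Pre_pick_least_damaging_py dice available) := by unfold Pre_pick_least_damaging_py; infer_instance

def pvWitness_pick_least_damaging_py : List Int × List String := ([1, 2], ["ones", "chance"])

def Spec_pick_least_damaging_py (dice : List Int) (available : List String) (out : String) : Prop := out = pick_least_damaging_py_alt dice available
instance (dice : List Int) (available : List String) (out : String) : Decidable (Spec_pick_least_damaging_py dice available out) := by unfold Spec_pick_least_damaging_py; infer_instance

-- ===== CLAIM (what is proved, stated in full; the proofs are below) =====
def Claim_equal_pick_least_damaging_py : Prop := ∀ (dice : List Int) (available : List String), Dom_pick_least_damaging_py dice available → Pre_pick_least_damaging_py dice available → Spec_pick_least_damaging_py dice available (pick_least_damaging_py dice available)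

-- ===== LEMMAS AND PROOFS =====

-- B's key function, named for the proofs (definitionally the lambda in the B port)
def pvKey (c : String) : Int := pvRank.getD c ((pvWastePriority.length : Int))

-- the folding step of PySem.List.min?, named so the first-tie induction can talk about it
def pvMinStep (key : String → Int) (acc : Option String) (x : String) : Option String :=
  match acc with
  | none => some x
  | some m => if key x < key m then some x else some m

theorem min?_eq_foldl_step (xs : List String) (key : String → Int) :
    PySem.List.min? xs key = xs.foldl (pvMinStep key) none := by
  unfold PySem.List.min?
  congr 1
  funext acc x
  cases acc <;> rfl

theorem pvKey_getElem_fin : ∀ i : Fin 13, pvKey (pvWastePriority.getD i.1 "") = (i.1 : Int) := by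
  decide

theorem pvKey_getElem (j : Nat) (h : j < pvWastePriority.length) :
    pvKey (pvWastePriority[j]) = (j : Int) := by
  have h13 : j < 13 := by simpa [pvWastePriority] using h
  have := pvKey_getElem_fin ⟨j, h13⟩
  rwa [List.getD_eq_getElem _ _ h] at this

theorem pvKey_not_mem (c : String) (h : c ∉ pvWastePriority) : pvKey c = 13 := by
  have hkeys : pvRank.keys = PySem.Set.ofList pvWastePriority := by
    have := PySem.Dict.keys_foldl_insert_key (l := PySem.List.enumerate pvWastePriority 0)
      (key := fun p => p.2) (f := fun d p => p.1) (d := (PySem.Dict.empty : PySem.Dict String Int))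
    simpa [PySem.List.map_snd_enumerate, PySem.Set.update_nil_left] using this
  have hcont : pvRank.contains c = false := by
    by_contra hc
    have hc' : pvRank.contains c = true := by revert hc; cases pvRank.contains c <;> simp
    have : c ∈ pvRank.keys := (PySem.Dict.contains_iff_mem_keys _ _).mp hc'
    rw [hkeys] at this
    exact h ((PySem.Set.mem_ofList _ _).mp this)
  have := PySem.Dict.getD_of_not_contains (d := pvRank) (k := c)
    (d0 := ((pvWastePriority.length : Int))) hcont
  simpa [pvKey, pvWastePriority] using this

theorem go_eq_find? (available l : List String) :
    pickLeastGo available l = l.find? (fun cat => available.contains cat) := by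
  induction l with
  | nil => rfl
  | cons x t ih => simp [pickLeastGo, List.find?, ih]; split <;> simp_all

theorem foldl_step_fix (key : String → Int) :
    ∀ (t : List String) (m : String), (∀ c ∈ t, ¬ key c < key m) →
      t.foldl (pvMinStep key) (some m) = some m := by
  intro t
  induction t with
  | nil => intro m _; rfl
  | cons c t ih =>
    intro m hm
    have hc : ¬ key c < key m := hm c (by simp)
    have hstep : pvMinStep key (some m) c = some m := by simp [pvMinStep, hc]
    rw [List.foldl_cons, hstep]
    exact ih m (fun d hd => hm d (by simp [hd]))

theorem min?_head_of_flat (key : String → Int) (t : List String) (x : String)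
    (h : ∀ c ∈ t, ¬ key c < key x) :
    PySem.List.min? (x :: t) key = some x := by
  rw [min?_eq_foldl_step, List.foldl_cons]
  have : pvMinStep key none x = some x := rfl
  rw [this]
  exact foldl_step_fix key t x h

-- ===== VERDICT (by name: the statement is the Claim_ definition above) =====
theorem pick_least_damaging_py_spec : Claim_equal_pick_least_damaging_py := by
  intro dice avail _hdom hpre
  unfold Spec_pick_least_damaging_py
  have hkey : (fun c => pvRank.getD c ((pvWastePriority.length : Int))) = pvKey := rfl
  cases hfind : pickLeastGo avail pvWastePriority with
  | none =>
    have hfind0 := hfind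
    rw [go_eq_find?, List.find?_eq_none] at hfind
    have hnot : ∀ c ∈ avail, c ∉ pvWastePriority := by
      intro c hc hcP
      exact (hfind c hcP) (by simpa [List.contains_eq_mem] using hc)
    cases avail with
    | nil => exact absurd rfl hpre
    | cons a t =>
      have hflat : ∀ c ∈ (a :: t), pvKey c = 13 := fun c hc => pvKey_not_mem c (hnot c hc)
      have hB : pick_least_damaging_py_alt dice (a :: t) = a := by
        unfold pick_least_damaging_py_alt
        rw [hkey, min?_head_of_flat pvKey t a (fun c hc => by
          rw [hflat c (by simp [hc]), hflat a (by simp)]; omega)]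
        rfl
      have hA : pick_least_damaging_py dice (a :: t) = a := by
        simp only [pick_least_damaging_py, hfind0]
        simp [PySem.List.pyGet?, PySem.List.pyIdx?]
      rw [hA, hB]
  | some p =>
    have hfind0 := hfind
    rw [go_eq_find?, List.find?_eq_some_iff_getElem] at hfind
    obtain ⟨hp, i, hi, hPi, hfirst⟩ := hfind
    have hpmem : p ∈ avail := by simpa [List.contains_eq_mem] using hp
    have hi13 : i < 13 := by simpa [pvWastePriority] using hi
    have hkp : pvKey p = (i : Int) := by rw [← hPi]; exact pvKey_getElem i hi
    have hmin : ∀ c ∈ avail, pvKey p ≤ pvKey c := by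
      intro c hc
      by_cases hcP : c ∈ pvWastePriority
      · obtain ⟨j, hj, hcj⟩ := List.mem_iff_getElem.mp hcP
        have hkc : pvKey c = (j : Int) := by rw [← hcj]; exact pvKey_getElem j hj
        rcases Nat.lt_or_ge j i with hji | hij
        · exfalso
          have := hfirst j hji
          simp only [Bool.not_eq_eq_eq_not, Bool.not_true, List.contains_eq_mem,
            decide_eq_false_iff_not] at this
          exact this (hcj ▸ hc)
        · rw [hkp, hkc]; exact_mod_cast hij
      · rw [hkp, pvKey_not_mem c hcP]; omega
    have huniq : ∀ c ∈ avail, pvKey c = pvKey p → c = p := by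
      intro c hc hkc
      by_cases hcP : c ∈ pvWastePriority
      · obtain ⟨j, hj, hcj⟩ := List.mem_iff_getElem.mp hcP
        have hkcj : pvKey c = (j : Int) := by rw [← hcj]; exact pvKey_getElem j hj
        have hji : j = i := by rw [hkcj, hkp] at hkc; exact_mod_cast hkc
        rw [← hcj, ← hPi]; subst hji; rfl
      · rw [pvKey_not_mem c hcP, hkp] at hkc; omega
    cases hm : PySem.List.min? avail pvKey with
    | none => exact absurd ((PySem.List.min?_eq_none_iff avail pvKey).mp hm) hpre
    | some m =>
      have hmmem := PySem.List.min?_mem hm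
      have h1 : pvKey m ≤ pvKey p := PySem.List.min?_isMin hm p hpmem
      have h2 : pvKey p ≤ pvKey m := hmin m hmmem
      have hmp : m = p := huniq m hmmem (le_antisymm h1 h2)
      have hB : pick_least_damaging_py_alt dice avail = p := by
        unfold pick_least_damaging_py_alt
        rw [hkey, hm, hmp]; rfl
      have hA : pick_least_damaging_py dice avail = p := by
        simp only [pick_least_damaging_py, hfind0]
      rw [hA, hB]
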